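-- pv_equiv track=rewrite | github.com/ysl-lab/CP_tutorial | 2_production/get_dihedrals.py | get_phi
-- ===== SOURCE A (Python) =====
-- def get_phi(num_res, resids, residues, atoms, indexes):
--     phi = []
--     for i in range(1, num_res + 1):
--         if i == 1:
--             prev_res = num_res
--         else:
--             prev_res = i - 1
--         temp = []
--         for n in range(len(residues)):
--             if resids[n] == prev_res and atoms[n] == 'C':
--                 temp.append(indexes[n])
--         for n in range(len(residues)):
--             if resids[n] == i and atoms[n] == 'N':
--                 temp.append(indexes[n])
--         for n in range(len(residues)):
--             if resids[n] == i and atoms[n] == 'CA':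
--                 temp.append(indexes[n])
--         for n in range(len(residues)):
--             if resids[n] == i and atoms[n] == 'C':
--                 temp.append(indexes[n])
--         phi.append(temp)
--     return phi
-- ===== SOURCE B (Python) =====
-- def get_phi(num_res, resids, residues, atoms, indexes):
--     m = len(residues)
--     by_key = {}
--     for r, a, idx in zip(resids[:m], atoms[:m], indexes[:m]):
--         by_key.setdefault((r, a), []).append(idx)
--     phi = []
--     for i in range(1, num_res + 1):
--         prev_res = num_res if i == 1 else i - 1
--         phi.append(by_key.get((prev_res, 'C'), [])
--                    + by_key.get((i, 'N'), [])
--                    + by_key.get((i, 'CA'), [])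
--                    + by_key.get((i, 'C'), []))
--     return phi
-- ===== Notes on version B (the rewrite author's own statement) =====
-- stated objective: faster
-- what changed: B replaces A's four full scans of the atom arrays per residue with one pass that groups indexes in a dict keyed by (resid, atom), after which each residue's phi list is four O(1) lookups.
-- outside the precondition, e.g. on get_phi(1, [2], [5], [], []): A returns [[]], B returns [[]]
import Mathlib
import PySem

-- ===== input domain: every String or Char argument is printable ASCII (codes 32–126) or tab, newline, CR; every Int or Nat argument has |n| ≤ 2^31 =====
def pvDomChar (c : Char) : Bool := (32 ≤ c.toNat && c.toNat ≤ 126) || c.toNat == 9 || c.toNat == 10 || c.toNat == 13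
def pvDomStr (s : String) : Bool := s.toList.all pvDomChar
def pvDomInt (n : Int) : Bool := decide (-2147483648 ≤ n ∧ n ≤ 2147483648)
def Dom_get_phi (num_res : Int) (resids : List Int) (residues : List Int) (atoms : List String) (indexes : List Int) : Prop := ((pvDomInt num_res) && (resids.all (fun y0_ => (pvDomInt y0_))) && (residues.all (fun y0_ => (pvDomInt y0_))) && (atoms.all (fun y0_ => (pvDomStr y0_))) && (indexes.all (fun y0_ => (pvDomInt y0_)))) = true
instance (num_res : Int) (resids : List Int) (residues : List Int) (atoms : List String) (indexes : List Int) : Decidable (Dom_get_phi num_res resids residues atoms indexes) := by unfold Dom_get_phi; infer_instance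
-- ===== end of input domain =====

-- B builds one dict keyed by (resid, atom) in a single pass and answers each residue by four lookups,
-- instead of A's four full scans per residue.

-- ===== PORT A =====
def get_phi (num_res : Int) (resids : List Int) (residues : List Int) (atoms : List String) (indexes : List Int) : List (List Int) :=
  (PySem.List.pyRange 1 (num_res + 1) 1).foldl (fun phi i =>
    let prev_res : Int := if i == 1 then num_res else i - 1
    let temp : List Int := (PySem.List.pyRange 0 (PySem.List.len residues) 1).foldl
      (fun temp n => if PySem.List.pyGetD resids n 0 == prev_res && PySem.List.pyGetD atoms n "" == "C" then temp ++ [PySem.List.pyGetD indexes n 0] else temp) []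
    let temp : List Int := (PySem.List.pyRange 0 (PySem.List.len residues) 1).foldl
      (fun temp n => if PySem.List.pyGetD resids n 0 == i && PySem.List.pyGetD atoms n "" == "N" then temp ++ [PySem.List.pyGetD indexes n 0] else temp) temp
    let temp : List Int := (PySem.List.pyRange 0 (PySem.List.len residues) 1).foldl
      (fun temp n => if PySem.List.pyGetD resids n 0 == i && PySem.List.pyGetD atoms n "" == "CA" then temp ++ [PySem.List.pyGetD indexes n 0] else temp) temp
    let temp : List Int := (PySem.List.pyRange 0 (PySem.List.len residues) 1).foldl
      (fun temp n => if PySem.List.pyGetD resids n 0 == i && PySem.List.pyGetD atoms n "" == "C" then temp ++ [PySem.List.pyGetD indexes n 0] else temp) temp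
    phi ++ [temp]) []

-- ===== PORT B =====
def get_phi_alt (num_res : Int) (resids : List Int) (residues : List Int) (atoms : List String) (indexes : List Int) : List (List Int) :=
  let m := residues.length
  let pairs : List ((Int × String) × Int) := ((resids.take m).zip (atoms.take m)).zip (indexes.take m)
  let by_key : PySem.Dict (Int × String) (List Int) :=
    pairs.foldl (fun d p => d.modify p.1 [] (· ++ [p.2])) PySem.Dict.empty
  (PySem.List.pyRange 1 (num_res + 1) 1).foldl (fun phi i =>
    let prev_res : Int := if i == 1 then num_res else i - 1
    phi ++ [by_key.getD (prev_res, "C") [] ++ by_key.getD (i, "N") [] ++ by_key.getD (i, "CA") [] ++ by_key.getD (i, "C") []]) []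

-- ===== PRECONDITION & SPEC =====
-- Pre_ excludes inputs where A's indexing resids[n]/atoms[n]/indexes[n] for n in range(len(residues))
-- can raise IndexError (lists shorter than residues while the outer loop runs). It is slightly narrower
-- than A's exact return domain: Python's short-circuit `and` can skip an out-of-range atoms/indexes read
-- when no resid matches, so on a few such mismatched-length inputs A still returns (B returns the same
-- value there, zip just truncates).
def Pre_get_phi (num_res : Int) (resids : List Int) (residues : List Int) (atoms : List String) (indexes : List Int) : Prop :=
  num_res ≤ 0 ∨ (residues.length ≤ resids.length ∧ residues.length ≤ atoms.length ∧ residues.length ≤ indexes.length)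
instance (num_res : Int) (resids : List Int) (residues : List Int) (atoms : List String) (indexes : List Int) : Decidable (Pre_get_phi num_res resids residues atoms indexes) := by unfold Pre_get_phi; infer_instance
def pvWitness_get_phi : Int × List Int × List Int × List String × List Int :=
  (2, [2, 1, 1, 1], [0, 0, 0, 0], ["C", "N", "CA", "C"], [10, 11, 12, 13])
def Spec_get_phi (num_res : Int) (resids : List Int) (residues : List Int) (atoms : List String) (indexes : List Int) (out : List (List Int)) : Prop := out = get_phi_alt num_res resids residues atoms indexes
instance (num_res : Int) (resids : List Int) (residues : List Int) (atoms : List String) (indexes : List Int) (out : List (List Int)) : Decidable (Spec_get_phi num_res resids residues atoms indexes out) := by unfold Spec_get_phi; infer_instance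

-- ===== CLAIM (what is proved, stated in full; the proofs are below) =====
def Claim_equal_get_phi : Prop := ∀ (num_res : Int) (resids : List Int) (residues : List Int) (atoms : List String) (indexes : List Int), Dom_get_phi num_res resids residues atoms indexes → Pre_get_phi num_res resids residues atoms indexes → Spec_get_phi num_res resids residues atoms indexes (get_phi num_res resids residues atoms indexes)

-- ===== LEMMAS AND PROOFS =====

-- A's inner scan (as a filter-map over the index range) collects exactly the indexes of B's
-- (resid, atom)-grouped pairs for the key (v, s).
lemma scan_eq_pairs (resids : List Int) (atoms : List String) (indexes : List Int) (m : Nat)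
    (h1 : m ≤ resids.length) (h2 : m ≤ atoms.length) (h3 : m ≤ indexes.length) (v : Int) (s : String) :
    ((PySem.List.pyRange 0 (m : Int) 1).filter
        (fun n => PySem.List.pyGetD resids n 0 == v && PySem.List.pyGetD atoms n "" == s)).map
      (fun n => PySem.List.pyGetD indexes n 0)
    = ((((resids.take m).zip (atoms.take m)).zip (indexes.take m)).filter
        (fun p => p.1 == (v, s))).map (fun p => p.2) := by
  induction m with
  | zero => simp
  | succ k ih =>
    have hk1 : k < resids.length := by omega
    have hk2 : k < atoms.length := by omega
    have hk3 : k < indexes.length := by omega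
    have hr : ((k + 1 : Nat) : Int) = (k : Int) + 1 := by push_cast; ring
    rw [hr, PySem.List.pyRange_one_succ_right (by positivity)]
    rw [List.take_add_one, List.take_add_one, List.take_add_one]
    rw [List.getElem?_eq_getElem hk1, List.getElem?_eq_getElem hk2, List.getElem?_eq_getElem hk3]
    simp only [Option.toList_some]
    rw [List.zip_append (by simp [Nat.le_of_lt hk1, Nat.le_of_lt hk2]),
        List.zip_append (by simp [List.length_zip, Nat.le_of_lt, hk1, hk2, hk3])]
    rw [List.filter_append, List.map_append, List.filter_append, List.map_append,
        ih (by omega) (by omega) (by omega)]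
    congr 1
    have e1 : PySem.List.pyGetD resids (k : Int) 0 = resids[k] := by
      simp [PySem.List.pyGetD_natCast, List.getD_eq_getElem?_getD, List.getElem?_eq_getElem hk1]
    have e2 : PySem.List.pyGetD atoms (k : Int) "" = atoms[k] := by
      simp [PySem.List.pyGetD_natCast, List.getD_eq_getElem?_getD, List.getElem?_eq_getElem hk2]
    have e3 : PySem.List.pyGetD indexes (k : Int) 0 = indexes[k] := by
      simp [PySem.List.pyGetD_natCast, List.getD_eq_getElem?_getD, List.getElem?_eq_getElem hk3]
    simp only [List.zip_cons_cons, List.zip_nil_right]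
    rcases Decidable.em (resids[k] = v ∧ atoms[k] = s) with hc | hc
    · simp [e1, e2, e3, hc]
    · have hb1 : ((resids[k], atoms[k]) == (v, s)) = false := by
        rw [beq_eq_false_iff_ne]
        intro h
        exact hc ⟨congrArg Prod.fst h, congrArg Prod.snd h⟩
      have hb2 : (resids[k] == v && atoms[k] == s) = false := by
        rw [Bool.and_eq_false_iff]
        by_cases hv : resids[k] = v
        · exact Or.inr (by rw [beq_eq_false_iff_ne]; intro h; exact hc ⟨hv, h⟩)
        · exact Or.inl (by rwa [beq_eq_false_iff_ne])
      simp [e1, e2, hb1, hb2]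

theorem get_phi_spec : Claim_equal_get_phi := by
  unfold Claim_equal_get_phi
  intro num_res resids residues atoms indexes _ hpre
  unfold Spec_get_phi get_phi get_phi_alt
  rcases hpre with hle | ⟨h1, h2, h3⟩
  · rw [PySem.List.pyRange_one_eq_nil (a := 1) (b := num_res + 1) (by omega)]
    simp
  · simp only [PySem.List.foldl_append_if, PySem.Dict.getD_foldl_modify_append,
      PySem.Dict.getD_empty, PySem.List.len_eq, List.nil_append]
    rw [PySem.List.foldl_append_singleton_eq_map, PySem.List.foldl_append_singleton_eq_map]
    simp only [List.nil_append]
    refine List.map_congr_left ?_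
    intro i _
    rw [scan_eq_pairs resids atoms indexes residues.length h1 h2 h3,
        scan_eq_pairs resids atoms indexes residues.length h1 h2 h3,
        scan_eq_pairs resids atoms indexes residues.length h1 h2 h3,
        scan_eq_pairs resids atoms indexes residues.length h1 h2 h3]
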